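-- pv_equiv track=rewrite | github.com/lwerdna/workbench | abstract-interpreter/interpreter.py | abstr_intersection
-- ===== SOURCE A (Python) =====
-- def abstr_intersection(a, b):
--     result = {}
--
--     for varname in set(list(a.keys()) + list(b.keys())):
--         if varname in a and varname in b:
--             value = a[varname].intersection(b[varname])
--         elif varname in a:
--             value = a[varname]
--         else:
--             value = b[varname]
--
--         result[varname] = value
--
--     return result
-- ===== SOURCE B (Python) =====
-- def abstr_intersection(a, b):
--     pairs = {}
--     for d in (a, b):
--         for k, s in d.items():
--             cnt = pairs.get(k, {})
--             for x in s:
--                 cnt[x] = cnt.get(x, 0) + 1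
--             pairs[k] = cnt
--     return {k: {x for x, c in cnt.items() if c == (2 if k in a and k in b else 1)}
--             for k, cnt in pairs.items()}
-- ===== Notes on version B (the rewrite author's own statement) =====
-- stated objective: alternative
-- what changed: Replaces A's per-key branching merge over the key union by a counting join: both dicts are flattened into per-key element counters in one uniform pass, and each result set is then read off as the elements whose count equals the number of dicts holding that key.
import Mathlib
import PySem

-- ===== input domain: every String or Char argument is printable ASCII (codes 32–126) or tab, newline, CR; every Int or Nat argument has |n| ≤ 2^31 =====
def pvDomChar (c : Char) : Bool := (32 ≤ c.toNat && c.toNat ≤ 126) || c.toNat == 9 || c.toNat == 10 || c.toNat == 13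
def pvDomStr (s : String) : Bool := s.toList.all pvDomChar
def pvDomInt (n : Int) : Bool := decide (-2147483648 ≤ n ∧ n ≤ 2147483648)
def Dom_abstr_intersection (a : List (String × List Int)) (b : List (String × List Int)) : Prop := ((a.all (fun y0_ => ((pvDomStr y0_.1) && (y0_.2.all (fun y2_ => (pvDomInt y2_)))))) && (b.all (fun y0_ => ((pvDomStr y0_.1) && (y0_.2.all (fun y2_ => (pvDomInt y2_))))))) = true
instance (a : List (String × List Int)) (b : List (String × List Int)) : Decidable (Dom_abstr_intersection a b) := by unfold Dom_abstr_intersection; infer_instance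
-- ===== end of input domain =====

-- B is a counting join: one uniform pass flattens both dicts into per-key element
-- counters, then each result set is read off as the elements whose count equals the
-- number of dicts holding that key — instead of A's per-key 3-way branching merge
-- over the deduplicated key union (objective: alternative).

-- ===== PORT A =====
def abstr_intersection (a : List (String × List Int)) (b : List (String × List Int)) : List (String × List Int) :=
  let da : PySem.Dict String (List Int) := PySem.Dict.mk a
  let db : PySem.Dict String (List Int) := PySem.Dict.mk b
  -- set(list(a.keys()) + list(b.keys())); the result dict is only compared as a dict afterwards
  let keys : PySem.Set String := PySem.Set.ofList (da.keys ++ db.keys)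
  (keys.foldl (fun result varname =>
      let value :=
        if da.contains varname && db.contains varname then
          -- a[varname].intersection(b[varname]); both keys present, so getD = [] is never taken
          PySem.Set.inter (da.getD varname []) (db.getD varname [])
        else if da.contains varname then da.getD varname []
        else db.getD varname []
      result.insert varname value) PySem.Dict.empty).items

-- ===== PORT B =====
-- inner loop: for x in s: cnt[x] = cnt.get(x, 0) + 1
def pvCntLoop (cnt : PySem.Dict Int Int) (s : List Int) : PySem.Dict Int Int :=
  s.foldl (fun cnt x => cnt.insert x (cnt.getD x 0 + 1)) cnt

-- one iteration of the outer loop: for k, s in d.items(): cnt = pairs.get(k, {}); ...; pairs[k] = cnt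
def pvPairsLoop (pairs : PySem.Dict String (PySem.Dict Int Int))
    (d : PySem.Dict String (List Int)) : PySem.Dict String (PySem.Dict Int Int) :=
  d.items.foldl (fun pairs kv =>
    pairs.insert kv.1 (pvCntLoop (pairs.getD kv.1 PySem.Dict.empty) kv.2)) pairs

def abstr_intersection_alt (a : List (String × List Int)) (b : List (String × List Int)) : List (String × List Int) :=
  let da : PySem.Dict String (List Int) := PySem.Dict.mk a
  let db : PySem.Dict String (List Int) := PySem.Dict.mk b
  -- for d in (a, b): the two iterations of the outer loop
  let pairs := pvPairsLoop (pvPairsLoop PySem.Dict.empty da) db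
  -- {k: {x for x, c in cnt.items() if c == (2 if k in a and k in b else 1)} for k, cnt in pairs.items()}
  (pairs.items.foldl (fun r kv =>
      r.insert kv.1 (kv.2.items.foldl (fun s q =>
          if q.2 == (if da.contains kv.1 && db.contains kv.1 then (2 : Int) else 1)
          then PySem.Set.add s q.1 else s) ([] : PySem.Set Int))) PySem.Dict.empty).items

-- ===== PRECONDITION & SPEC =====
-- Pre_ requires distinct keys and distinct elements in each value list: a Python dict
-- cannot carry duplicate keys and a Python set cannot carry duplicate elements, so
-- association lists violating this do not represent any input of A.
def Pre_abstr_intersection (a : List (String × List Int)) (b : List (String × List Int)) : Prop :=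
  (a.map Prod.fst).Nodup ∧ (b.map Prod.fst).Nodup ∧
  (∀ p ∈ a, (p.2 : List Int).Nodup) ∧ (∀ p ∈ b, (p.2 : List Int).Nodup)
instance (a : List (String × List Int)) (b : List (String × List Int)) : Decidable (Pre_abstr_intersection a b) := by unfold Pre_abstr_intersection; infer_instance

def pvWitness_abstr_intersection : (List (String × List Int)) × (List (String × List Int)) :=
  ([("x", [1, 2]), ("y", [3])], [("x", [2, 3]), ("z", [5])])

def Spec_abstr_intersection (a : List (String × List Int)) (b : List (String × List Int)) (out : List (String × List Int)) : Prop := out = abstr_intersection_alt a b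
instance (a : List (String × List Int)) (b : List (String × List Int)) (out : List (String × List Int)) : Decidable (Spec_abstr_intersection a b out) := by unfold Spec_abstr_intersection; infer_instance

-- ===== CLAIM (what is proved, stated in full; the proofs are below) =====
def Claim_equal_abstr_intersection : Prop := ∀ (a : List (String × List Int)) (b : List (String × List Int)), Dom_abstr_intersection a b → Pre_abstr_intersection a b → Spec_abstr_intersection a b (abstr_intersection a b)

-- ===== LEMMAS AND PROOFS =====

-- Common canonical form both ports are reduced to.
def pvCanon (a b : List (String × List Int)) : List (String × List Int) :=
  a.map (fun p => (p.1,
      if (PySem.Dict.mk b).contains p.1 then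
        PySem.Set.inter p.2 ((PySem.Dict.mk b).getD p.1 []) else p.2))
  ++ b.filter (fun p => !(PySem.Dict.mk a).contains p.1)

lemma pv_foldl_add (l s : List String) (hl : l.Nodup) :
    l.foldl PySem.Set.add s = s ++ l.filter (fun x => !PySem.Set.contains s x) := by
  induction l generalizing s with
  | nil => simp
  | cons x t ih =>
    rcases List.nodup_cons.mp hl with ⟨hx, ht⟩
    simp only [List.foldl_cons, List.filter_cons]
    by_cases hmem : x ∈ s
    · have h1 : PySem.Set.add s x = s := by simp [PySem.Set.add, PySem.Set.contains, hmem]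
      rw [h1, ih s ht]
      simp [PySem.Set.contains, hmem]
    · have h1 : PySem.Set.add s x = s ++ [x] := by simp [PySem.Set.add, PySem.Set.contains, hmem]
      rw [h1, ih _ ht, List.append_assoc]
      simp only [PySem.Set.contains, List.contains_eq_mem, hmem,
        decide_false, Bool.not_false, if_pos, List.singleton_append]
      congr 2
      apply List.filter_congr
      intro y hy
      have hyx : y ≠ x := fun h => hx (h ▸ hy)
      simp [List.mem_append, hyx]

lemma pv_contains_eq (a : List (String × List Int)) (x : String) :
    (PySem.Dict.mk a).contains x = PySem.Set.contains (a.map Prod.fst) x := by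
  rw [PySem.Dict.contains_eq_decide_mem_keys]
  simp [PySem.Set.contains, PySem.Dict.keys]

lemma pvA_canon (a b : List (String × List Int))
    (ha : (a.map Prod.fst).Nodup) (hb : (b.map Prod.fst).Nodup) :
    abstr_intersection a b = pvCanon a b := by
  unfold abstr_intersection
  simp only []
  set da := PySem.Dict.mk a with hda
  set db := PySem.Dict.mk b with hdb
  have hnd : (PySem.Set.ofList (da.keys ++ db.keys)).Nodup := PySem.Set.nodup_ofList _
  have hkeys : PySem.Set.ofList (da.keys ++ db.keys)
      = a.map Prod.fst ++ (b.map Prod.fst).filter (fun x => !PySem.Set.contains (a.map Prod.fst) x) := by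
    rw [PySem.Set.ofList_eq_foldl, List.foldl_append]
    have h1 : (da.keys).foldl PySem.Set.add [] = a.map Prod.fst := by
      rw [← PySem.Set.ofList_eq_foldl]
      exact PySem.Set.ofList_eq_self_of_nodup _ ha
    rw [h1]
    exact pv_foldl_add _ _ hb
  rw [PySem.Dict.items_foldl_insert_fresh _ _ _ _ (fun x _ => rfl)
        (by rw [List.map_id']; exact hnd)]
  have hemp : (PySem.Dict.empty : PySem.Dict String (List Int)).items = [] := rfl
  rw [hemp, List.nil_append, hkeys, List.map_append]
  unfold pvCanon
  congr 1
  · rw [List.map_map]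
    apply List.map_congr_left
    intro p hp
    have hka : da.contains p.1 = true := by
      rw [PySem.Dict.contains_eq_decide_mem_keys]
      exact decide_eq_true (List.mem_map.mpr ⟨p, hp, rfl⟩)
    have hget : da.getD p.1 [] = p.2 := by
      apply PySem.Dict.getD_of_mem_items
      · simpa [hda] using hp
      · exact ha
    simp only [Function.comp, hka, Bool.true_and, if_true, hget]
    rfl
  · rw [List.filter_map, List.map_map]
    have hpred : ∀ p ∈ b, ((fun x => !PySem.Set.contains (a.map Prod.fst) x) ∘ Prod.fst) p
        = (fun p : String × List Int => !da.contains p.1) p := by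
      intro p _
      simp only [Function.comp, ← pv_contains_eq]
      rfl
    have hfeq : List.filter ((fun x => !PySem.Set.contains (a.map Prod.fst) x) ∘ Prod.fst) b
        = List.filter (fun p : String × List Int => !da.contains p.1) b :=
      List.filter_congr hpred
    rw [hfeq]
    have : ∀ p ∈ List.filter (fun p : String × List Int => !da.contains p.1) b,
        ((fun x => (x, if (da.contains x && db.contains x) = true then
            PySem.Set.inter (da.getD x []) (db.getD x [])
          else if da.contains x = true then da.getD x [] else db.getD x [])) ∘ Prod.fst) p = p := by
      intro p hp
      rw [List.mem_filter] at hp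
      have hnka : da.contains p.1 = false := by
        simpa using hp.2
      have hget : db.getD p.1 [] = p.2 := by
        apply PySem.Dict.getD_of_mem_items
        · simpa [hdb] using hp.1
        · exact hb
      simp [Function.comp, hnka, hget]
    rw [List.map_congr_left this, List.map_id']

-- A conditional collecting fold over pairs with distinct first components is a filter.
lemma pvB3 (P : Int × Int → Bool) (l : List (Int × Int)) (s : List Int)
    (h : (s ++ l.map Prod.fst).Nodup) :
    l.foldl (fun s q => if P q then PySem.Set.add s q.1 else s) s
      = s ++ (l.filter P).map Prod.fst := by
  induction l generalizing s with
  | nil => simp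
  | cons q t ih =>
    have h' : (s ++ List.map Prod.fst t).Nodup :=
      h.sublist ((List.sublist_cons_self q.1 (t.map Prod.fst)).append_left s)
    simp only [List.foldl_cons, List.filter_cons]
    by_cases hp : P q = true
    · have hq1s : q.1 ∉ s := by
        intro hmem
        rcases List.nodup_append.mp h with ⟨_, _, hdisj⟩
        exact hdisj _ hmem _ List.mem_cons_self rfl
      rw [if_pos hp, PySem.Set.add_of_not_mem hq1s]
      have h2 : ((s ++ [q.1]) ++ List.map Prod.fst t).Nodup := by
        rw [List.append_assoc]
        simpa using h
      rw [ih _ h2]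
      simp [hp, List.append_assoc]
    · rw [if_neg hp, ih _ h']
      simp [hp]

-- One outer-loop pass: existing counters are extended, fresh keys start new counters.
lemma pvB2 (l : List (String × List Int)) (d : PySem.Dict String (PySem.Dict Int Int))
    (hd : d.keys.Nodup) (hl : (l.map Prod.fst).Nodup) :
    (l.foldl (fun pairs kv =>
        pairs.insert kv.1 (pvCntLoop (pairs.getD kv.1 PySem.Dict.empty) kv.2)) d).items
      = d.items.map (fun q => (q.1,
          if (PySem.Dict.mk l).contains q.1 then
            pvCntLoop q.2 ((PySem.Dict.mk l).getD q.1 []) else q.2))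
        ++ (l.filter (fun p => !d.contains p.1)).map (fun p => (p.1, PySem.Dict.counter p.2)) := by
  induction l generalizing d with
  | nil => simp [PySem.Dict.contains, PySem.Dict.getD]
  | cons kv t ih =>
    obtain ⟨k, v⟩ := kv
    rcases List.nodup_cons.mp hl with ⟨hk, ht⟩
    simp only [List.foldl_cons]
    by_cases hc : d.contains k = true
    · have hd' : (d.insert k (pvCntLoop (d.getD k PySem.Dict.empty) v)).keys.Nodup :=
        PySem.Dict.nodup_keys_insert _ _ _ hd
      rw [ih _ hd' ht, PySem.Dict.items_insert_of_contains _ _ hc, List.map_map]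
      congr 1
      · apply List.map_congr_left
        rintro ⟨p1, p2⟩ hp
        by_cases hpk : p1 = k
        · subst hpk
          have hget : d.getD p1 PySem.Dict.empty = p2 :=
            PySem.Dict.getD_of_mem_items _ hp hd _
          have htc : ({ items := t } : PySem.Dict String (List Int)).contains p1 = false := by
            rw [PySem.Dict.contains_eq_decide_mem_keys]
            simpa [PySem.Dict.keys] using hk
          have hcc : ({ items := (p1, v) :: t } : PySem.Dict String (List Int)).contains p1 = true := by
            simp [PySem.Dict.contains]
          have hgg : ({ items := (p1, v) :: t } : PySem.Dict String (List Int)).getD p1 [] = v := by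
            simp [PySem.Dict.getD, PySem.Dict.get?_mk_cons]
          simp only [Function.comp, beq_self_eq_true, if_true, htc, Bool.false_eq_true,
            if_false, hcc, hgg, hget]
        · have hbne : (p1 == k) = false := by simpa using hpk
          have hcc : ({ items := (k, v) :: t } : PySem.Dict String (List Int)).contains p1
              = ({ items := t } : PySem.Dict String (List Int)).contains p1 := by
            simp [PySem.Dict.contains]
            exact fun h => absurd h.symm hpk
          have hgg : ({ items := (k, v) :: t } : PySem.Dict String (List Int)).getD p1 []
              = ({ items := t } : PySem.Dict String (List Int)).getD p1 [] := by
            simp [PySem.Dict.getD, PySem.Dict.get?_mk_cons,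
              beq_eq_false_iff_ne.mpr (fun h => hpk h.symm : ¬ k = p1)]
          simp only [Function.comp, hbne, Bool.false_eq_true, if_false, hcc, hgg]
      · rw [List.filter_cons_of_neg (by simp [hc])]
        apply congrArg (List.map _)
        apply List.filter_congr
        intro p hp
        have hne : p.1 ≠ k := fun h => hk (h ▸ List.mem_map.mpr ⟨p, hp, rfl⟩)
        rw [PySem.Dict.contains_insert]
        simp [hne]
    · have hcf : d.contains k = false := by simpa using hc
      have hd' : (d.insert k (pvCntLoop (d.getD k PySem.Dict.empty) v)).keys.Nodup :=
        PySem.Dict.nodup_keys_insert _ _ _ hd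
      have hget : d.getD k PySem.Dict.empty = PySem.Dict.empty :=
        PySem.Dict.getD_of_not_contains _ _ hcf
      rw [ih _ hd' ht, PySem.Dict.items_insert_of_not_contains _ _ hcf, List.map_append]
      have h1 : List.map (fun q : String × PySem.Dict Int Int => (q.1,
          if ({ items := t } : PySem.Dict String (List Int)).contains q.1 = true then
            pvCntLoop q.2 (({ items := t } : PySem.Dict String (List Int)).getD q.1 []) else q.2))
            [(k, pvCntLoop (d.getD k PySem.Dict.empty) v)]
          = [(k, PySem.Dict.counter v)] := by
        have htc : ({ items := t } : PySem.Dict String (List Int)).contains k = false := by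
          rw [PySem.Dict.contains_eq_decide_mem_keys]
          simpa [PySem.Dict.keys] using hk
        simp only [List.map_cons, List.map_nil, htc, Bool.false_eq_true, if_false, hget]
        rw [show pvCntLoop PySem.Dict.empty v = PySem.Dict.counter v from
          PySem.Dict.foldl_insert_getD_add_one_eq_counter v]
      rw [h1]
      have h2 : List.filter (fun p : String × List Int => !(d.insert k (pvCntLoop (d.getD k PySem.Dict.empty) v)).contains p.1) t
          = List.filter (fun p : String × List Int => !d.contains p.1) t := by
        apply List.filter_congr
        intro p hp
        have hne : p.1 ≠ k := fun h => hk (h ▸ List.mem_map.mpr ⟨p, hp, rfl⟩)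
        rw [PySem.Dict.contains_insert]
        simp [hne]
      rw [h2]
      have h3 : List.map (fun q : String × PySem.Dict Int Int => (q.1,
          if ({ items := t } : PySem.Dict String (List Int)).contains q.1 = true then
            pvCntLoop q.2 (({ items := t } : PySem.Dict String (List Int)).getD q.1 []) else q.2)) d.items
          = List.map (fun q : String × PySem.Dict Int Int => (q.1,
          if ({ items := (k, v) :: t } : PySem.Dict String (List Int)).contains q.1 = true then
            pvCntLoop q.2 (({ items := (k, v) :: t } : PySem.Dict String (List Int)).getD q.1 []) else q.2)) d.items := by
        apply List.map_congr_left
        rintro ⟨p1, p2⟩ hp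
        have hpk : p1 ≠ k := by
          intro h
          have hmem : p1 ∈ d.keys := List.mem_map.mpr ⟨(p1, p2), hp, rfl⟩
          rw [h] at hmem
          rw [PySem.Dict.contains_eq_decide_mem_keys] at hcf
          simp [hmem] at hcf
        have hcc : ({ items := (k, v) :: t } : PySem.Dict String (List Int)).contains p1
            = ({ items := t } : PySem.Dict String (List Int)).contains p1 := by
          simp [PySem.Dict.contains]
          exact fun h => absurd h.symm hpk
        have hgg : ({ items := (k, v) :: t } : PySem.Dict String (List Int)).getD p1 []
            = ({ items := t } : PySem.Dict String (List Int)).getD p1 [] := by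
          simp [PySem.Dict.getD, PySem.Dict.get?_mk_cons,
            beq_eq_false_iff_ne.mpr (fun h => hpk h.symm : ¬ k = p1)]
        simp only [hcc, hgg]
      rw [h3, List.filter_cons_of_pos (by simp [hcf]), List.append_assoc, List.singleton_append]
      rw [List.map_cons]

-- Shared key: elements counted twice are exactly the intersection (in a's order).
lemma pvB_shared (va vb : List Int) (hva : va.Nodup) (hvb : vb.Nodup) :
    (pvCntLoop (PySem.Dict.counter va) vb).items.foldl (fun s q =>
        if q.2 == (2 : Int) then PySem.Set.add s q.1 else s) ([] : PySem.Set Int)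
      = PySem.Set.inter va vb := by
  have hkeys : (pvCntLoop (PySem.Dict.counter va) vb).keys = PySem.Set.update va vb := by
    unfold pvCntLoop
    rw [PySem.Dict.keys_foldl_insert, PySem.Dict.keys_counter,
      PySem.Set.ofList_eq_self_of_nodup _ hva]
  have hnd : (pvCntLoop (PySem.Dict.counter va) vb).keys.Nodup := by
    unfold pvCntLoop
    exact PySem.Dict.nodup_keys_foldl_insert _ _ _ (PySem.Dict.nodup_keys_counter va)
  have hget : ∀ x, (pvCntLoop (PySem.Dict.counter va) vb).getD x 0
      = (va.count x : Int) + (vb.count x : Int) := by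
    intro x
    unfold pvCntLoop
    rw [PySem.Dict.getD_foldl_insert_add_one, PySem.Dict.getD_counter]
  have hitems : (pvCntLoop (PySem.Dict.counter va) vb).items
      = (PySem.Set.update va vb).map (fun x => (x, (pvCntLoop (PySem.Dict.counter va) vb).getD x 0)) := by
    conv_lhs => rw [PySem.Dict.items_eq_map_keys _ hnd 0]
    rw [hkeys]
  have hndk : (([] : List Int) ++ ((PySem.Set.update va vb).map
      (fun x => (x, (pvCntLoop (PySem.Dict.counter va) vb).getD x 0))).map Prod.fst).Nodup := by
    rw [List.nil_append, List.map_map]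
    have hid : (PySem.Set.update va vb).map (Prod.fst ∘ fun x => (x, (pvCntLoop (PySem.Dict.counter va) vb).getD x 0))
        = (PySem.Set.update va vb).map id := rfl
    rw [hid, List.map_id]
    exact PySem.Set.nodup_update va vb hva
  rw [hitems, pvB3 _ _ _ hndk, List.nil_append, List.filter_map, List.map_map]
  have hupd : PySem.Set.update va vb = va ++ vb.filter (fun y => !(PySem.Set.contains va y)) := by
    rw [PySem.Set.update_eq_append_filter, PySem.Set.ofList_eq_self_of_nodup _ hvb]
  rw [hupd, List.filter_append, List.map_append]
  have hA : List.map (Prod.fst ∘ fun x => (x, (pvCntLoop (PySem.Dict.counter va) vb).getD x 0))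
        (List.filter ((fun q : Int × Int => q.2 == (2 : Int)) ∘ fun x => (x, (pvCntLoop (PySem.Dict.counter va) vb).getD x 0)) va)
      = PySem.Set.inter va vb := by
    have hfa : List.filter ((fun q : Int × Int => q.2 == (2 : Int)) ∘ fun x => (x, (pvCntLoop (PySem.Dict.counter va) vb).getD x 0)) va
        = List.filter (fun x => PySem.Set.contains vb x) va := by
      apply List.filter_congr
      intro x hx
      have h1 : va.count x = 1 := List.count_eq_one_of_mem hva hx
      by_cases hb : x ∈ vb
      · have h2 : vb.count x = 1 := List.count_eq_one_of_mem hvb hb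
        simp [Function.comp, hget, h1, h2, PySem.Set.contains, hb]
      · have h2 : vb.count x = 0 := List.count_eq_zero_of_not_mem hb
        simp [Function.comp, hget, h1, h2, PySem.Set.contains, hb]
    rw [hfa]
    have hid : List.map (Prod.fst ∘ fun x => (x, (pvCntLoop (PySem.Dict.counter va) vb).getD x 0))
        (List.filter (fun x => PySem.Set.contains vb x) va)
        = List.map id (List.filter (fun x => PySem.Set.contains vb x) va) := rfl
    rw [hid, List.map_id]
    simp [PySem.Set.inter, PySem.Set.contains]
  have hB : List.filter ((fun q : Int × Int => q.2 == (2 : Int)) ∘ fun x => (x, (pvCntLoop (PySem.Dict.counter va) vb).getD x 0))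
        (vb.filter (fun y => !(PySem.Set.contains va y))) = [] := by
    rw [List.filter_filter]
    apply List.filter_eq_nil_iff.mpr
    intro x hx
    by_cases hmem : x ∈ va
    · simp [PySem.Set.contains, hmem]
    · have h1 : va.count x = 0 := List.count_eq_zero_of_not_mem hmem
      have h2 : vb.count x = 1 := List.count_eq_one_of_mem hvb hx
      simp [Function.comp, PySem.Set.contains, hmem, hget, h1, h2]
  rw [hA, hB]
  simp

-- Exclusive key: every element is counted once, so the whole set is read back.
lemma pvB_single (v : List Int) (hv : v.Nodup) :
    (PySem.Dict.counter v).items.foldl (fun s q =>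
        if q.2 == (1 : Int) then PySem.Set.add s q.1 else s) ([] : PySem.Set Int) = v := by
  have hitems : (PySem.Dict.counter v).items = v.map (fun x => (x, (v.count x : Int))) := by
    rw [PySem.Dict.items_counter, PySem.Set.ofList_eq_self_of_nodup _ hv]
  have hndk : (([] : List Int) ++ (v.map (fun x => (x, (v.count x : Int)))).map Prod.fst).Nodup := by
    rw [List.nil_append, List.map_map]
    have hid : v.map (Prod.fst ∘ fun x => (x, (v.count x : Int))) = v.map id := rfl
    rw [hid, List.map_id]
    exact hv
  rw [hitems, pvB3 _ _ _ hndk, List.nil_append, List.filter_map, List.map_map]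
  have hfa : List.filter ((fun q : Int × Int => q.2 == (1 : Int)) ∘ fun x => (x, (v.count x : Int))) v = v := by
    apply List.filter_eq_self.mpr
    intro x hx
    have h1 : v.count x = 1 := List.count_eq_one_of_mem hv hx
    simp [Function.comp, h1]
  rw [hfa]
  have hid : List.map (Prod.fst ∘ fun x => (x, (v.count x : Int))) v = List.map id v := rfl
  rw [hid, List.map_id]

lemma pvB_canon (a b : List (String × List Int))
    (ha : (a.map Prod.fst).Nodup) (hb : (b.map Prod.fst).Nodup)
    (hva : ∀ p ∈ a, (p.2 : List Int).Nodup) (hvb : ∀ p ∈ b, (p.2 : List Int).Nodup) :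
    abstr_intersection_alt a b = pvCanon a b := by
  unfold abstr_intersection_alt
  simp only []
  set da : PySem.Dict String (List Int) := PySem.Dict.mk a with hda
  set db : PySem.Dict String (List Int) := PySem.Dict.mk b with hdb
  have hia : da.items = a := rfl
  have hib : db.items = b := rfl
  -- first pass
  have hS1 : (pvPairsLoop PySem.Dict.empty da).items
      = a.map (fun p => (p.1, PySem.Dict.counter p.2)) := by
    unfold pvPairsLoop
    rw [hia, pvB2 a PySem.Dict.empty (by simp [PySem.Dict.keys, PySem.Dict.empty]) ha]
    have he : (PySem.Dict.empty : PySem.Dict String (PySem.Dict Int Int)).items = [] := rfl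
    rw [he]
    simp [PySem.Dict.contains_empty]
  have hkeysS1 : (pvPairsLoop PySem.Dict.empty da).keys = a.map Prod.fst := by
    simp only [PySem.Dict.keys, hS1, List.map_map]
    rfl
  have hconS1 : ∀ q, (pvPairsLoop PySem.Dict.empty da).contains q = da.contains q := by
    intro q
    rw [PySem.Dict.contains_eq_decide_mem_keys, PySem.Dict.contains_eq_decide_mem_keys, hkeysS1]
    simp [hda, PySem.Dict.keys]
  -- second pass
  have hP : (pvPairsLoop (pvPairsLoop PySem.Dict.empty da) db).items
      = a.map (fun p => (p.1,
          if db.contains p.1 then pvCntLoop (PySem.Dict.counter p.2) (db.getD p.1 [])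
          else PySem.Dict.counter p.2))
        ++ (b.filter (fun p => !da.contains p.1)).map (fun p => (p.1, PySem.Dict.counter p.2)) := by
    unfold pvPairsLoop
    rw [hib, pvB2 b _ (by show (pvPairsLoop PySem.Dict.empty da).keys.Nodup; rw [hkeysS1]; exact ha) hb]
    have hmapped : (pvPairsLoop PySem.Dict.empty da).items.map (fun q => (q.1,
        if (PySem.Dict.mk b).contains q.1 then pvCntLoop q.2 ((PySem.Dict.mk b).getD q.1 []) else q.2))
        = a.map (fun p => (p.1,
            if db.contains p.1 then pvCntLoop (PySem.Dict.counter p.2) (db.getD p.1 [])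
            else PySem.Dict.counter p.2)) := by
      rw [hS1, List.map_map]
      rfl
    have hfil : List.filter (fun p : String × List Int => !(pvPairsLoop PySem.Dict.empty da).contains p.1) b
        = List.filter (fun p : String × List Int => !da.contains p.1) b := by
      apply List.filter_congr
      intro p _
      rw [hconS1]
    unfold pvPairsLoop at hmapped hfil
    rw [hmapped, hfil]
  -- the result keys are distinct
  have hndP : ((pvPairsLoop (pvPairsLoop PySem.Dict.empty da) db).items.map Prod.fst).Nodup := by
    rw [hP, List.map_append, List.map_map, List.map_map]
    have h1 : a.map (Prod.fst ∘ fun p : String × List Int => (p.1,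
        if db.contains p.1 then pvCntLoop (PySem.Dict.counter p.2) (db.getD p.1 [])
        else PySem.Dict.counter p.2)) = a.map Prod.fst := rfl
    have h2 : (b.filter (fun p : String × List Int => !da.contains p.1)).map
        (Prod.fst ∘ fun p : String × List Int => (p.1, PySem.Dict.counter p.2))
        = (b.filter (fun p : String × List Int => !da.contains p.1)).map Prod.fst := rfl
    rw [h1, h2, List.nodup_append]
    refine ⟨ha, hb.sublist (List.Sublist.map Prod.fst List.filter_sublist), ?_⟩
    intro x hx y hy heq
    rcases List.mem_map.mp hx with ⟨p, hp, hp1⟩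
    have hker : da.contains x = true := by
      rw [hda, PySem.Dict.contains_eq_decide_mem_keys]
      exact decide_eq_true (by
        simp only [PySem.Dict.keys]
        exact List.mem_map.mpr ⟨p, hp, hp1⟩)
    rcases List.mem_map.mp hy with ⟨q, hq, hq1⟩
    rw [List.mem_filter] at hq
    rw [heq, ← hq1] at hker
    have hq2 := hq.2
    simp [hker] at hq2
  -- final comprehension
  rw [PySem.Dict.items_foldl_insert_fresh _ _ _ _
      (fun kv _ => PySem.Dict.contains_empty _) hndP]
  have hemp : (PySem.Dict.empty : PySem.Dict String (PySem.Set Int)).items = [] := rfl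
  rw [hemp, List.nil_append, hP, List.map_append, List.map_map, List.map_map]
  unfold pvCanon
  congr 1
  · apply List.map_congr_left
    intro p hp
    have hca : da.contains p.1 = true := by
      rw [hda, PySem.Dict.contains_eq_decide_mem_keys]
      exact decide_eq_true (by
        simp only [PySem.Dict.keys]
        exact List.mem_map.mpr ⟨p, hp, rfl⟩)
    by_cases hcb : db.contains p.1 = true
    · have hvbN : (db.getD p.1 []).Nodup := by
        rcases hw : db.get? p.1 with _ | w
        · rw [PySem.Dict.getD_eq_get?_getD, hw]
          exact List.nodup_nil
        · rw [PySem.Dict.getD_eq_get?_getD, hw]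
          exact hvb (p.1, w) (PySem.Dict.mem_items_of_get?_eq_some db hw)
      simp only [Function.comp, hca, hcb, Bool.and_self, if_true]
      rw [pvB_shared p.2 (db.getD p.1 []) (hva p hp) hvbN, ← hdb, if_pos hcb]
    · have hcbf : db.contains p.1 = false := by simpa using hcb
      simp only [Function.comp, hca, hcbf, Bool.true_and, Bool.false_eq_true, if_false]
      rw [pvB_single p.2 (hva p hp), ← hdb]
      simp [hcbf]
  · have hmap : ∀ p ∈ List.filter (fun p : String × List Int => !da.contains p.1) b,
        ((fun kv : String × PySem.Dict Int Int =>
            (kv.1, kv.2.items.foldl (fun s q =>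
              if q.2 == (if da.contains kv.1 && db.contains kv.1 then (2 : Int) else 1)
              then PySem.Set.add s q.1 else s) ([] : PySem.Set Int)))
          ∘ fun p : String × List Int => (p.1, PySem.Dict.counter p.2)) p = p := by
      intro p hp
      rw [List.mem_filter] at hp
      have hcaf : da.contains p.1 = false := by simpa using hp.2
      simp only [Function.comp, hcaf, Bool.false_and, Bool.false_eq_true, if_false]
      rw [pvB_single p.2 (hvb p hp.1)]
    rw [List.map_congr_left hmap, List.map_id']

-- ===== VERDICT (by name: the statement is the Claim_ definition above) =====
theorem abstr_intersection_spec : Claim_equal_abstr_intersection := by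
  intro a b _ hpre
  unfold Spec_abstr_intersection
  rw [pvA_canon a b hpre.1 hpre.2.1, pvB_canon a b hpre.1 hpre.2.1 hpre.2.2.1 hpre.2.2.2]
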